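-- pv_equiv track=rewrite | github.com/hmih/aoc | 2023/p05/main.py | read_maps
-- ===== SOURCE A (Python) =====
-- def read_maps(lines):
--     res = {}
--     tmp = []
--
--     for line in lines:
--         if line:
--             tmp.append(line)
--             continue
--
--         header = tmp.pop(0).split(" ")[0]
--         entries = [list(map(int, t.split(" "))) for t in tmp]
--         res[header] = entries
--         tmp = []
--
--     if tmp:
--         header = tmp.pop(0).split(" ")[0]
--         entries = [list(map(int, t.split(" "))) for t in tmp]
--         res[header] = entries
--
--     return res
-- ===== SOURCE B (Python) =====
-- def read_maps(lines):
--     # Two-phase: split lines into blank-delimited segments, then turn each segment into a dict entry.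
--     segs = [[]]
--     for line in lines:
--         if line:
--             segs[-1].append(line)
--         else:
--             segs.append([])
--
--     res = {}
--     for seg in segs[:-1]:
--         res[seg[0].split(" ")[0]] = [list(map(int, t.split(" "))) for t in seg[1:]]
--     last = segs[-1]
--     if last:
--         res[last[0].split(" ")[0]] = [list(map(int, t.split(" "))) for t in last[1:]]
--     return res
-- ===== Notes on version B (the rewrite author's own statement) =====
-- stated objective: alternative
-- what changed: A's single streaming pass with a pending-buffer variable is replaced by a two-phase decomposition: first split the lines into blank-delimited segments, then map each segment to its dict entry.
import Mathlib
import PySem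

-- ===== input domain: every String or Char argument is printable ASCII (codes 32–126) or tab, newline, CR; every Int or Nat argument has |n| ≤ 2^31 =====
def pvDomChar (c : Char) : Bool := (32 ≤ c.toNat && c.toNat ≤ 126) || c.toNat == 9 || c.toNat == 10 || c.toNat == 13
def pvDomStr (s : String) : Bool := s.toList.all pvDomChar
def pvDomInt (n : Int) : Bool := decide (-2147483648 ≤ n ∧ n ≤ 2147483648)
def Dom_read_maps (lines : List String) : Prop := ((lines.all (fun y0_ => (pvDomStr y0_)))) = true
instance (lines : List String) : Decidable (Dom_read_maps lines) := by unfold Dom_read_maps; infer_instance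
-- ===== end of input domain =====

-- B changes the decomposition: instead of A's one streaming pass with a pending buffer, it first
-- splits the lines into blank-delimited segments and then maps each segment to a dict entry
-- (objective: alternative decomposition; same cost).

-- shared tiny helpers (the identical expressions appear verbatim in both Pythons)
-- header of a block: line.split(" ")[0]  (split(" ") is never empty, so [0] never raises)
def pvHeader (s : String) : String := String.ofList ((PySem.Chars.splitOn s.toList [' ']).headD [])
-- list(map(int, t.split(" "))) : none = some token raises ValueError in int()
def pvParseLine (t : String) : Option (List Int) :=
  (PySem.Chars.splitOn t.toList [' ']).mapM PySem.Int.ofChars?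

-- ===== PORT A =====
-- the duplicated block body: header = tmp.pop(0)…; res[header] = entries
-- none = IndexError (pop from empty tmp) or ValueError (int)
def pvFlush (res : PySem.Dict String (List (List Int))) (tmp : List String) :
    Option (PySem.Dict String (List (List Int))) :=
  match tmp with
  | [] => none
  | h :: t => (t.mapM pvParseLine).map (fun es => res.insert (pvHeader h) es)

def pvLoopA : List String → PySem.Dict String (List (List Int)) → List String →
    Option (PySem.Dict String (List (List Int)))
  | [], res, tmp => if tmp.isEmpty then some res else pvFlush res tmp
  | l :: rest, res, tmp =>
    if l ≠ "" then pvLoopA rest res (tmp ++ [l])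
    else match pvFlush res tmp with
      | none => none
      | some res' => pvLoopA rest res' []

def read_maps (lines : List String) : List (String × List (List Int)) :=
  ((pvLoopA lines PySem.Dict.empty []).getD PySem.Dict.empty).items

-- ===== PORT B =====
-- phase 1: split lines into blank-delimited segments (always at least one segment)
def pvSegs : List String → List (List String)
  | [] => [[]]
  | l :: rest =>
    let s := pvSegs rest
    if l = "" then [] :: s else (l :: s.headD []) :: s.tail

-- phase 2: one segment becomes one dict entry (none = IndexError on seg[0] / ValueError in int)
def pvStep (d : Option (PySem.Dict String (List (List Int)))) (seg : List String) :
    Option (PySem.Dict String (List (List Int))) :=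
  d.bind fun res =>
    match seg with
    | [] => none
    | h :: t => (t.mapM pvParseLine).map (fun es => res.insert (pvHeader h) es)

def read_maps_alt (lines : List String) : List (String × List (List Int)) :=
  let segs := pvSegs lines
  let d := segs.dropLast.foldl pvStep (some PySem.Dict.empty)
  let last := segs.getLastD []
  ((if last.isEmpty then d else pvStep d last).getD PySem.Dict.empty).items

-- ===== PRECONDITION & SPEC =====
-- Pre_ excludes exactly the inputs where Python A raises: an empty segment before a blank line
-- (IndexError from tmp.pop(0)) or a data line with a token int() rejects (ValueError).
-- closed-form over the raw lines: no leading blank, no two consecutive blanks (both mean an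
-- empty segment, pop(0) raises), and every data line (a non-blank line directly after a
-- non-blank line, i.e. not a segment header) is all int tokens.
def Pre_read_maps (lines : List String) : Prop :=
  (∀ h ∈ lines.take 1, h ≠ "") ∧
  ∀ p ∈ lines.zip lines.tail,
    (p.2 = "" → p.1 ≠ "") ∧ (p.1 ≠ "" → p.2 ≠ "" → (pvParseLine p.2).isSome)
instance (lines : List String) : Decidable (Pre_read_maps lines) := by
  unfold Pre_read_maps; infer_instance

def pvWitness_read_maps : List String :=
  ["seed-to-soil map:", "50 98 2", "52 50 48", "", "soil map:", "1 2 3"]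

def Spec_read_maps (lines : List String) (out : List (String × List (List Int))) : Prop := out = read_maps_alt lines
instance (lines : List String) (out : List (String × List (List Int))) : Decidable (Spec_read_maps lines out) := by unfold Spec_read_maps; infer_instance

-- ===== CLAIM (what is proved, stated in full; the proofs are below) =====
def Claim_equal_read_maps : Prop := ∀ (lines : List String), Dom_read_maps lines → Pre_read_maps lines → Spec_read_maps lines (read_maps lines)

-- ===== LEMMAS AND PROOFS =====

lemma pvSegs_ne_nil (lines : List String) : pvSegs lines ≠ [] := by
  cases lines with
  | nil => simp [pvSegs]
  | cons l rest =>
    simp only [pvSegs]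
    split <;> simp

-- prepend a pending buffer onto the first segment
def pvPrepend (tmp : List String) : List (List String) → List (List String)
  | [] => [tmp]
  | s :: ss => (tmp ++ s) :: ss

-- B's segment processing, abstracted over the initial state
def pvProc (d : Option (PySem.Dict String (List (List Int)))) (segs : List (List String)) :
    Option (PySem.Dict String (List (List Int))) :=
  if (segs.getLastD []).isEmpty then segs.dropLast.foldl pvStep d
  else pvStep (segs.dropLast.foldl pvStep d) (segs.getLastD [])

lemma pvStep_some (res : PySem.Dict String (List (List Int))) (seg : List String) :
    pvStep (some res) seg = pvFlush res seg := by
  cases seg <;> rfl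

lemma pvStep_none (seg : List String) : pvStep none seg = none := rfl

lemma foldl_pvStep_none (segs : List (List String)) :
    segs.foldl pvStep none = none := by
  induction segs with
  | nil => rfl
  | cons s ss ih => simpa [List.foldl, pvStep_none] using ih

lemma pvProc_none (segs : List (List String)) : pvProc none segs = none := by
  unfold pvProc
  rw [foldl_pvStep_none]
  split <;> simp [pvStep_none]

lemma pvProc_cons (d : Option (PySem.Dict String (List (List Int))))
    (s : List String) (ss : List (List String)) (h : ss ≠ []) :
    pvProc d (s :: ss) = pvProc (pvStep d s) ss := by
  unfold pvProc
  rw [List.dropLast_cons_of_ne_nil h, List.foldl_cons]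
  cases ss with
  | nil => exact absurd rfl h
  | cons a as => rfl

lemma pvProc_single (d : Option (PySem.Dict String (List (List Int)))) (tmp : List String) :
    pvProc d [tmp] = if tmp.isEmpty then d else pvStep d tmp := by
  cases tmp <;> rfl

lemma pvLoopA_eq_pvProc (lines : List String) :
    ∀ (res : PySem.Dict String (List (List Int))) (tmp : List String),
      pvLoopA lines res tmp = pvProc (some res) (pvPrepend tmp (pvSegs lines)) := by
  induction lines with
  | nil =>
    intro res tmp
    have hpp : pvPrepend tmp [[]] = [tmp] := by simp [pvPrepend]
    show (if tmp.isEmpty then some res else pvFlush res tmp) = pvProc (some res) (pvPrepend tmp [[]])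
    rw [hpp, pvProc_single]
    cases tmp with
    | nil => rfl
    | cons h t => simp [pvStep_some]
  | cons l rest ih =>
    intro res tmp
    by_cases hl : l = ""
    · subst hl
      have h1 : pvLoopA ("" :: rest) res tmp =
          (match pvFlush res tmp with
            | none => none
            | some res' => pvLoopA rest res' []) := by
        simp [pvLoopA]
      have h2 : pvPrepend tmp (pvSegs ("" :: rest)) = tmp :: pvSegs rest := by
        simp [pvSegs, pvPrepend]
      rw [h1, h2, pvProc_cons _ _ _ (pvSegs_ne_nil rest), pvStep_some]
      cases hflush : pvFlush res tmp with
      | none => exact (pvProc_none _).symm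
      | some res' =>
        simp only []
        rw [ih res' []]
        cases hs : pvSegs rest with
        | nil => exact absurd hs (pvSegs_ne_nil rest)
        | cons a as => simp [pvPrepend]
    · cases hs : pvSegs rest with
      | nil => exact absurd hs (pvSegs_ne_nil rest)
      | cons a as =>
        have h1 : pvLoopA (l :: rest) res tmp = pvLoopA rest res (tmp ++ [l]) := by
          simp [pvLoopA, hl]
        have hseg : pvSegs (l :: rest) = (l :: a) :: as := by
          simp only [pvSegs, hs, if_neg hl, List.headD_cons, List.tail_cons]
        rw [h1, hseg, ih res (tmp ++ [l]), hs]
        simp [pvPrepend]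

lemma read_maps_eq (lines : List String) : read_maps lines = read_maps_alt lines := by
  unfold read_maps read_maps_alt
  rw [pvLoopA_eq_pvProc lines PySem.Dict.empty []]
  cases hs : pvSegs lines with
  | nil => exact absurd hs (pvSegs_ne_nil lines)
  | cons a as => simp [pvPrepend, pvProc]

-- ===== VERDICT (by name: the statement is the Claim_ definition above) =====
theorem read_maps_spec : Claim_equal_read_maps := by
  intro lines _ _
  unfold Spec_read_maps
  exact read_maps_eq lines
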